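-- pv_equiv track=rewrite | github.com/kha4720/edu_ai_team-sesac | inputs/mock_planning_outputs/question_quest_v0/pytest.py | derive_overall
-- ===== SOURCE A (Python) =====
-- def derive_overall(specificity, context, purpose):
--     """루브릭 종합 판정 도출"""
--     values = [specificity, context, purpose]
--     if all(v == "excellent" for v in values):
--         return "excellent"
--     elif any(v == "needs_work" for v in values):
--         return "needs_work"
--     else:
--         return "good"
-- ===== SOURCE B (Python) =====
-- def derive_overall(specificity, context, purpose):
--     """루브릭 종합 판정 도출"""
--     def score(v):
--         if v == "excellent":
--             return 2
--         if v == "needs_work":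
--             return 0
--         return 1
--     m = min(score(specificity), score(context), score(purpose))
--     return ["needs_work", "good", "excellent"][m]
-- ===== Notes on version B (the rewrite author's own statement) =====
-- stated objective: alternative
-- what changed: Replaced the all/any quantifier branches with a severity-score encoding (excellent=2, needs_work=0, other=1), a min reduction, and a table lookup translating the minimum back to a rating string.
import Mathlib
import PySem

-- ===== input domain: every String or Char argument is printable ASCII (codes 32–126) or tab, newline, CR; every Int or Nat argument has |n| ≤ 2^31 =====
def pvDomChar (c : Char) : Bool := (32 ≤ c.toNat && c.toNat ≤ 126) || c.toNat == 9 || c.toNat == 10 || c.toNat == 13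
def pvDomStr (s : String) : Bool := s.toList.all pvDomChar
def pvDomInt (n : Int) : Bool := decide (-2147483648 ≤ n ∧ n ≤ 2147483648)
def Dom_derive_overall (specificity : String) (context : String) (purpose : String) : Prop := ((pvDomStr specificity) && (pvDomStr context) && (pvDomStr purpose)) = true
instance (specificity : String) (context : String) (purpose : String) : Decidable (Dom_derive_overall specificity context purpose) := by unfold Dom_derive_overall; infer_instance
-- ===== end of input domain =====

-- B replaces A's all/any quantifier branches by a severity score (excellent=2, needs_work=0, other=1),
-- a min reduction and a table lookup; same results, objective: alternative decomposition.

-- ===== PORT A =====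
def derive_overall (specificity : String) (context : String) (purpose : String) : String :=
  let values : List String := [specificity, context, purpose]
  if values.all (fun v => v == "excellent") then "excellent"
  else if values.any (fun v => v == "needs_work") then "needs_work"
  else "good"

-- ===== PORT B =====
def pvScore (v : String) : Int :=
  if v == "excellent" then 2
  else if v == "needs_work" then 0
  else 1

def derive_overall_alt (specificity : String) (context : String) (purpose : String) : String :=
  let m := min (min (pvScore specificity) (pvScore context)) (pvScore purpose)
  (PySem.List.pyGet? ["needs_work", "good", "excellent"] m).getD ""

-- ===== PRECONDITION & SPEC =====
def Spec_derive_overall (specificity : String) (context : String) (purpose : String) (out : String) : Prop := out = derive_overall_alt specificity context purpose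
instance (specificity : String) (context : String) (purpose : String) (out : String) : Decidable (Spec_derive_overall specificity context purpose out) := by unfold Spec_derive_overall; infer_instance

-- ===== CLAIM (what is proved, stated in full; the proofs are below) =====
def Claim_equal_derive_overall : Prop := ∀ (specificity : String) (context : String) (purpose : String), Dom_derive_overall specificity context purpose → Spec_derive_overall specificity context purpose (derive_overall specificity context purpose)

-- ===== LEMMAS AND PROOFS =====

-- ===== VERDICT (by name: the statement is the Claim_ definition above) =====
set_option maxHeartbeats 1000000 in
theorem derive_overall_spec : Claim_equal_derive_overall := by
  intro s c p _
  show derive_overall s c p = derive_overall_alt s c p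
  cases hse : s == "excellent" <;> cases hsn : s == "needs_work" <;>
  cases hce : c == "excellent" <;> cases hcn : c == "needs_work" <;>
  cases hpe : p == "excellent" <;> cases hpn : p == "needs_work" <;>
  simp_all [derive_overall, derive_overall_alt, pvScore,
    PySem.List.pyGet?, PySem.List.pyIdx?]
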